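-- pv_equiv track=rewrite | github.com/Enorma/ALGO2020 | precedence_FINAL.py | disjointAutomata
-- ===== SOURCE A (Python) =====
-- import copy
--
-- def disjointAutomata(L):
--
--     total_words = len(L)
--
--     if total_words==0:
--
--         A_matrix     = {0:{0:set()}}
--         start_states = {0}
--         final_states = {0}
--         total_states = 1
--         tramas = []
--
--         return A_matrix, start_states, final_states, total_states, tramas
--     #if
--
--     total_letters = sum(len(row) for row in L)
--     total_states  = total_words + total_letters
--
--     A_matrix = {}
--     A_row    = {}
--
--     for i in range(total_states):
--         A_row[i] = set()
--     #for
--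
--     for i in range(total_states):
--         A_matrix[i] = copy.deepcopy(A_row)
--     #for
--
--     curr_state = 0
--
--     start_states = set()
--     final_states = set()
--     tramas = []
--
--     for i in range(total_words):
--
--         tramas.append([])
--
--         wordlen = len(L[i])
--
--         if wordlen==0:
--             start_states.add(curr_state)
--             final_states.add(curr_state)
--             curr_state += 1
--             continue
--         #if
--
--         for j in range(wordlen):
--
--             A_matrix[curr_state][curr_state+1] = set(L[i][j])
--
--             if j>0 and (j)<wordlen:
--                 tramas[i].append(curr_state)
--             #if
--
--             if j==0:
--                 start_states.add(curr_state)
--             #if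
--
--             curr_state += 1
--
--             if (j+1)==wordlen:
--                 final_states.add(curr_state)
--                 curr_state += 1
--             #if
--         #for
--     #for
--
--     return A_matrix, start_states, final_states, total_states, tramas
-- ===== SOURCE B (Python) =====
-- def disjointAutomata(L):
--     if not L:
--         return {0: {0: set()}}, {0}, {0}, 1, []
--     offsets = [0]
--     for w in L:
--         offsets.append(offsets[-1] + len(w) + 1)
--     total_states = offsets[-1]
--     trans = {offsets[i] + j: set(L[i][j])
--              for i in range(len(L)) for j in range(len(L[i]))}
--     A_matrix = {s: {t: (trans[s] if t == s + 1 and s in trans else set())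
--                     for t in range(total_states)}
--                 for s in range(total_states)}
--     start_states = {offsets[i] for i in range(len(L))}
--     final_states = {offsets[i] + len(L[i]) for i in range(len(L))}
--     tramas = [list(range(offsets[i] + 1, offsets[i] + len(L[i]))) for i in range(len(L))]
--     return A_matrix, start_states, final_states, total_states, tramas
-- ===== Notes on version B (the rewrite author's own statement) =====
-- stated objective: simpler
-- what changed: B replaces A's deepcopy-initialised dict-of-dicts mutated through a running state counter with a direct construction: a prefix-sum offset table, a transition map built per word independently, the dense matrix / start / final / tramas each produced by a single comprehension.
import Mathlib
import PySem

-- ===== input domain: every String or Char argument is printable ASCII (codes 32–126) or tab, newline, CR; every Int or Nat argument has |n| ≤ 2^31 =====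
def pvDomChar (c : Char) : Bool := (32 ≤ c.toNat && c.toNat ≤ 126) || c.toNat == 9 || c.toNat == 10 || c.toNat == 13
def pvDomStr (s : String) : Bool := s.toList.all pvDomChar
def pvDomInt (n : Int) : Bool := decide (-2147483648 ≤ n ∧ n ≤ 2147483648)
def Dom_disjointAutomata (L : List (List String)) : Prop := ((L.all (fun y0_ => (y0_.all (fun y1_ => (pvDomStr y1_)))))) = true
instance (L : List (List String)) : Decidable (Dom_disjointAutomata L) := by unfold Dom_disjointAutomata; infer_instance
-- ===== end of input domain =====

-- B rebuilds the NFA by direct construction (prefix-sum offset table, per-word independent filling,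
-- dense matrix by comprehension) instead of A's deepcopy-initialised dict mutated by a running-counter loop;
-- objective: simpler decomposition, same exact result.


-- the state carried by A's word loop: (A_matrix, curr_state, start_states, final_states, tramas)
abbrev PVSt : Type :=
  PySem.Dict Int (PySem.Dict Int (List String)) × Int × PySem.Set Int × PySem.Set Int × List (List Int)

-- ===== PORT A =====
-- shared by both ports: Python's set(s) on a string s — distinct characters, first-occurrence order
def pvCharSet (s : String) : List String :=
  PySem.Set.ofList (s.toList.map (fun c => String.ofList [c]))

-- tramas[i].append(x) where i is always the last index of tramas
def pvAppendLast (T : List (List Int)) (x : Int) : List (List Int) :=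
  T.dropLast ++ [(T.getLast?.getD []) ++ [x]]

-- body of A's inner loop 'for j in range(wordlen)'
def pvInnerBody (word : List String) (wordlen : Int) (st2 : PVSt) (j : Int) : PVSt :=
  let M := st2.1.modify st2.2.1 PySem.Dict.empty
    (fun row => row.insert (st2.2.1 + 1) (pvCharSet (PySem.List.pyGetD word j "")))
  let T := if 0 < j ∧ j < wordlen then pvAppendLast st2.2.2.2.2 st2.2.1 else st2.2.2.2.2
  let S := if j = 0 then PySem.Set.add st2.2.2.1 st2.2.1 else st2.2.2.1
  let curr := st2.2.1 + 1
  if j + 1 = wordlen then (M, curr + 1, S, PySem.Set.add st2.2.2.2.1 curr, T)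
  else (M, curr, S, st2.2.2.2.1, T)

-- body of A's outer loop 'for i in range(total_words)'
def pvOuterBody (L : List (List String)) (st : PVSt) (i : Int) : PVSt :=
  let T := st.2.2.2.2 ++ [[]]
  let word := PySem.List.pyGetD L i []
  let wordlen : Int := PySem.List.len word
  if wordlen = 0 then
    (st.1, st.2.1 + 1, PySem.Set.add st.2.2.1 st.2.1, PySem.Set.add st.2.2.2.1 st.2.1, T)
  else
    (PySem.List.pyRange 0 wordlen).foldl (pvInnerBody word wordlen)
      (st.1, st.2.1, st.2.2.1, st.2.2.2.1, T)

def disjointAutomata (L : List (List String)) :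
    (List (Int × List (Int × List String))) × List Int × List Int × Int × List (List Int) :=
  let totalWords : Int := PySem.List.len L
  if totalWords = 0 then
    ([(0, [(0, [])])], [0], [0], 1, [])
  else
    let totalLetters : Int := (L.map (fun row => PySem.List.len row)).sum
    let totalStates : Int := totalWords + totalLetters
    let A_row : PySem.Dict Int (List String) :=
      (PySem.List.pyRange 0 totalStates).foldl (fun d i => d.insert i []) PySem.Dict.empty
    let A_matrix : PySem.Dict Int (PySem.Dict Int (List String)) :=
      (PySem.List.pyRange 0 totalStates).foldl (fun d i => d.insert i A_row) PySem.Dict.empty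
    let st :=
      (PySem.List.pyRange 0 totalWords).foldl (pvOuterBody L)
        (A_matrix, 0, PySem.Set.empty, PySem.Set.empty, [])
    (st.1.items.map (fun p => (p.1, p.2.items)), st.2.2.1, st.2.2.2.1, totalStates, st.2.2.2.2)

-- ===== PORT B =====
def disjointAutomata_alt (L : List (List String)) :
    (List (Int × List (Int × List String))) × List Int × List Int × Int × List (List Int) :=
  if L.isEmpty then
    ([(0, [(0, [])])], [0], [0], 1, [])
  else
    let offsets : List Int :=
      L.foldl (fun acc w => acc ++ [PySem.List.pyGetD acc (-1) 0 + PySem.List.len w + 1]) [0]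
    let totalStates : Int := PySem.List.pyGetD offsets (-1) 0
    let nL : Int := PySem.List.len L
    let trans : PySem.Dict Int (List String) :=
      PySem.Dict.ofList ((PySem.List.pyRange 0 nL).flatMap (fun i =>
        let w := PySem.List.pyGetD L i []
        (PySem.List.pyRange 0 (PySem.List.len w)).map (fun j =>
          (PySem.List.pyGetD offsets i 0 + j, pvCharSet (PySem.List.pyGetD w j "")))))
    let A_matrix : List (Int × List (Int × List String)) :=
      (PySem.List.pyRange 0 totalStates).map (fun s =>
        (s, (PySem.List.pyRange 0 totalStates).map (fun t =>
          (t, if t = s + 1 ∧ trans.contains s then trans.getD s [] else []))))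
    let start_states : List Int :=
      PySem.Set.ofList ((PySem.List.pyRange 0 nL).map (fun i => PySem.List.pyGetD offsets i 0))
    let final_states : List Int :=
      PySem.Set.ofList ((PySem.List.pyRange 0 nL).map (fun i =>
        PySem.List.pyGetD offsets i 0 + PySem.List.len (PySem.List.pyGetD L i [])))
    let tramas : List (List Int) :=
      (PySem.List.pyRange 0 nL).map (fun i =>
        PySem.List.pyRange (PySem.List.pyGetD offsets i 0 + 1)
          (PySem.List.pyGetD offsets i 0 + PySem.List.len (PySem.List.pyGetD L i [])))
    (A_matrix, start_states, final_states, totalStates, tramas)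

-- ===== PRECONDITION & SPEC =====
def Spec_disjointAutomata (L : List (List String)) (out : (List (Int × List (Int × List String))) × List Int × List Int × Int × List (List Int)) : Prop := out = disjointAutomata_alt L
instance (L : List (List String)) (out : (List (Int × List (Int × List String))) × List Int × List Int × Int × List (List Int)) : Decidable (Spec_disjointAutomata L out) := by unfold Spec_disjointAutomata; infer_instance

-- ===== CLAIM (what is proved, stated in full; the proofs are below) =====
def Claim_equal_disjointAutomata : Prop := ∀ (L : List (List String)), Dom_disjointAutomata L → Spec_disjointAutomata L (disjointAutomata L)

-- ===== LEMMAS AND PROOFS =====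

def pvOff (P : List (List String)) : Int := (P.map (fun w => (w.length : Int) + 1)).sum

lemma pvOff_append (P Q : List (List String)) : pvOff (P ++ Q) = pvOff P + pvOff Q := by simp [pvOff]

lemma pvOff_nonneg (P : List (List String)) : 0 ≤ pvOff P := by
  apply List.sum_nonneg; intro x hx
  obtain ⟨w, -, rfl⟩ := List.mem_map.1 hx; positivity

lemma pvOff_take_le (P : List (List String)) (k : Nat) : pvOff (P.take k) ≤ pvOff P := by
  conv_rhs => rw [← List.take_append_drop k P]
  rw [pvOff_append]; have := pvOff_nonneg (P.drop k); omega

lemma pvOff_take_mono (P : List (List String)) {a b : Nat} (h : a ≤ b) :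
    pvOff (P.take a) ≤ pvOff (P.take b) := by
  rw [show P.take a = (P.take b).take a by rw [List.take_take, min_eq_left h]]
  exact pvOff_take_le _ a

lemma pvOff_take_succ (P : List (List String)) (k : Nat) (h : k < P.length) :
    pvOff (P.take (k + 1)) = pvOff (P.take k) + ((P.getD k []).length : Int) + 1 := by
  rw [List.take_add_one, List.getElem?_eq_getElem h, Option.toList_some, pvOff_append]
  rw [List.getD_eq_getElem _ _ h]
  simp [pvOff]; ring

lemma pvOff_take_lt (P : List (List String)) (k1 k2 : Nat) (h : k1 < k2) (h2 : k2 ≤ P.length) :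
    pvOff (P.take k1) < pvOff (P.take k2) := by
  have h1 : pvOff (P.take (k1+1)) = pvOff (P.take k1) + ((P.getD k1 []).length : Int) + 1 :=
    pvOff_take_succ P k1 (lt_of_lt_of_le h h2)
  have h3 : pvOff (P.take (k1+1)) ≤ pvOff (P.take k2) := pvOff_take_mono P h
  have : (0:Int) ≤ ((P.getD k1 []).length : Int) := by positivity
  omega

def pvTrans (P : List (List String)) : List (Int × List String) :=
  (List.range P.length).flatMap (fun k =>
    (List.range (P.getD k []).length).map (fun (j : Nat) =>
      (pvOff (P.take k) + (j : Int), pvCharSet ((P.getD k []).getD j ""))))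

def pvStarts (P : List (List String)) : List Int :=
  (List.range P.length).map (fun k => pvOff (P.take k))

def pvFinals (P : List (List String)) : List Int :=
  (List.range P.length).map (fun k => pvOff (P.take k) + ((P.getD k []).length : Int))

def pvTramas (P : List (List String)) : List (List Int) :=
  (List.range P.length).map (fun k =>
    PySem.List.pyRange (pvOff (P.take k) + 1) (pvOff (P.take k) + ((P.getD k []).length : Int)))

lemma pvTake_app (P : List (List String)) (w : List String) {k : Nat} (h : k ≤ P.length) :
    (P ++ [w]).take k = P.take k := List.take_append_of_le_length h

lemma pvGetD_app (P : List (List String)) (w : List String) {k : Nat} (h : k < P.length) :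
    (P ++ [w]).getD k [] = P.getD k [] := by
  rw [List.getD_eq_getElem _ _ (by simp; omega), List.getD_eq_getElem _ _ h]
  exact List.getElem_append_left h

lemma pvStarts_append (P : List (List String)) (w : List String) :
    pvStarts (P ++ [w]) = pvStarts P ++ [pvOff P] := by
  simp only [pvStarts, List.length_append, List.length_singleton, List.range_succ, List.map_append]
  congr 1
  · exact List.map_congr_left fun k hk => by
      rw [pvTake_app P w (le_of_lt (List.mem_range.1 hk))]
  · simp [pvTake_app P w (le_refl _), List.take_length]

lemma pvFinals_append (P : List (List String)) (w : List String) :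
    pvFinals (P ++ [w]) = pvFinals P ++ [pvOff P + (w.length : Int)] := by
  simp only [pvFinals, List.length_append, List.length_singleton, List.range_succ, List.map_append]
  congr 1
  · exact List.map_congr_left fun k hk => by
      have hk := List.mem_range.1 hk
      rw [pvTake_app P w hk.le, pvGetD_app P w hk]
  · simp [pvTake_app P w (le_refl _), List.take_length]

lemma pvTramas_append (P : List (List String)) (w : List String) :
    pvTramas (P ++ [w]) = pvTramas P ++ [PySem.List.pyRange (pvOff P + 1) (pvOff P + (w.length : Int))] := by
  simp only [pvTramas, List.length_append, List.length_singleton, List.range_succ, List.map_append]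
  congr 1
  · exact List.map_congr_left fun k hk => by
      have hk := List.mem_range.1 hk
      rw [pvTake_app P w hk.le, pvGetD_app P w hk]
  · simp [pvTake_app P w (le_refl _), List.take_length]

lemma pvTrans_append (P : List (List String)) (w : List String) :
    pvTrans (P ++ [w]) = pvTrans P ++
      (List.range w.length).map (fun (j : Nat) => (pvOff P + (j : Int), pvCharSet (w.getD j ""))) := by
  simp only [pvTrans, List.length_append, List.length_singleton, List.range_succ, List.flatMap_append]
  congr 1
  · rw [List.flatMap_def, List.flatMap_def]
    congr 1
    exact List.map_congr_left fun k hk => by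
      have hk := List.mem_range.1 hk
      rw [pvTake_app P w hk.le, pvGetD_app P w hk]
  · simp [pvTake_app P w (le_refl _), List.take_length]

lemma pvMem_starts_lt (P : List (List String)) (x : Int) (h : x ∈ pvStarts P) : x < pvOff P := by
  obtain ⟨k, hk, rfl⟩ := List.mem_map.1 h
  have hk := List.mem_range.1 hk
  calc pvOff (P.take k) < pvOff (P.take (k+1)) := pvOff_take_lt P k (k+1) (by omega) hk
    _ ≤ pvOff P := by conv_rhs => rw [← List.take_length (l := P)]
                      exact pvOff_take_mono P hk

lemma pvMem_finals_lt (P : List (List String)) (x : Int) (h : x ∈ pvFinals P) : x < pvOff P := by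
  obtain ⟨k, hk, rfl⟩ := List.mem_map.1 h
  have hk := List.mem_range.1 hk
  have h1 := pvOff_take_succ P k hk
  have h2 : pvOff (P.take (k+1)) ≤ pvOff P := by
    conv_rhs => rw [← List.take_length (l := P)]
    exact pvOff_take_mono P hk
  omega

lemma pvTrans_key_lt (P : List (List String)) (p : Int × List String) (h : p ∈ pvTrans P) :
    0 ≤ p.1 ∧ p.1 < pvOff P := by
  simp only [pvTrans, List.mem_flatMap, List.mem_map, List.mem_range] at h
  obtain ⟨k, hk, j, hj, rfl⟩ := h
  have h1 := pvOff_take_succ P k hk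
  have h2 : pvOff (P.take (k+1)) ≤ pvOff P := by
    conv_rhs => rw [← List.take_length (l := P)]
    exact pvOff_take_mono P hk
  have h0 := pvOff_nonneg (P.take k)
  constructor <;> simp <;> omega

lemma pvTrans_keys_pairwise (P : List (List String)) :
    ((pvTrans P).map (·.1)).Pairwise (· < ·) := by
  induction P using List.reverseRecOn with
  | nil => simp [pvTrans]
  | append_singleton P w ih =>
    rw [pvTrans_append, List.map_append, List.pairwise_append]
    refine ⟨ih, ?_, ?_⟩
    · rw [List.map_map, List.pairwise_map]
      exact List.pairwise_lt_range.imp (by intro a b h; simpa using h)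
    · intro a ha b hb
      obtain ⟨p, hp, rfl⟩ := List.mem_map.1 ha
      obtain ⟨q, hq, rfl⟩ := List.mem_map.1 hb
      obtain ⟨j, hj, rfl⟩ := List.mem_map.1 hq
      have := (pvTrans_key_lt P p hp).2
      simp only []
      have h0 : (0:Int) ≤ (j:Int) := by positivity
      omega

def pvEnt (tr : List (Int × List String)) (s : Int) : List String := (PySem.Dict.mk tr).getD s []

lemma pvEnt_nil (s : Int) : pvEnt [] s = [] := rfl

lemma pvEnt_def (tr : List (Int × List String)) (s : Int) :
    pvEnt tr s = ((tr.find? (fun p => p.1 == s)).map (·.2)).getD [] := rfl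

lemma pvEnt_append_right_ne (l₁ l₂ : List (Int × List String)) (s : Int)
    (h : ∀ p ∈ l₂, p.1 ≠ s) : pvEnt (l₁ ++ l₂) s = pvEnt l₁ s := by
  have h2 : l₂.find? (fun p => p.1 == s) = none :=
    List.find?_eq_none.2 (by intro p hp; simpa using h p hp)
  rw [pvEnt_def, pvEnt_def, List.find?_append, h2]
  simp

lemma pvEnt_append_fresh (l : List (Int × List String)) (s : Int) (v : List String)
    (rest : List (Int × List String)) (h : ∀ p ∈ l, p.1 ≠ s) :
    pvEnt (l ++ (s, v) :: rest) s = v := by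
  have h2 : l.find? (fun p => p.1 == s) = none :=
    List.find?_eq_none.2 (by intro p hp; simpa using h p hp)
  rw [pvEnt_def, List.find?_append, h2]
  simp

def pvRowD (N : Int) (tr : List (Int × List String)) (s : Int) : PySem.Dict Int (List String) :=
  PySem.Dict.mk ((PySem.List.pyRange 0 N).map (fun t => (t, if t = s + 1 then pvEnt tr s else [])))

def pvMD (N : Int) (tr : List (Int × List String)) : PySem.Dict Int (PySem.Dict Int (List String)) :=
  PySem.Dict.mk ((PySem.List.pyRange 0 N).map (fun s => (s, pvRowD N tr s)))

lemma pvMD_getD (N : Int) (tr : List (Int × List String)) (r : Int) (h0 : 0 ≤ r) (h1 : r < N) :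
    (pvMD N tr).getD r PySem.Dict.empty = pvRowD N tr r := by
  apply PySem.Dict.getD_of_mem_items
  · exact List.mem_map.2 ⟨r, PySem.List.mem_pyRange_one.2 ⟨h0, by omega⟩, rfl⟩
  · show ((PySem.List.pyRange 0 N).map _).map _ |>.Nodup
    rw [List.map_map]
    have : ((fun x : Int × PySem.Dict Int (List String) => x.1) ∘ fun s => (s, pvRowD N tr s)) = id := rfl
    rw [this, List.map_id]
    exact PySem.List.nodup_pyRange_one 0 N

lemma pvMD_contains (N : Int) (tr : List (Int × List String)) (r : Int) (h0 : 0 ≤ r) (h1 : r < N) :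
    (pvMD N tr).contains r = true := by
  simp only [PySem.Dict.contains, pvMD, List.any_map, List.any_eq_true]
  exact ⟨r, PySem.List.mem_pyRange_one.2 ⟨h0, by omega⟩, by simp⟩

lemma pvRowD_contains (N : Int) (tr : List (Int × List String)) (s r : Int) (h0 : 0 ≤ r) (h1 : r < N) :
    (pvRowD N tr s).contains r = true := by
  simp only [PySem.Dict.contains, pvRowD, List.any_map, List.any_eq_true]
  exact ⟨r, PySem.List.mem_pyRange_one.2 ⟨h0, by omega⟩, by simp⟩

lemma pvRowD_insert (N : Int) (tr : List (Int × List String)) (r : Int) (v : List String)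
    (hr0 : 0 ≤ r) (hrN : r + 1 < N) (hfresh : ∀ p ∈ tr, p.1 ≠ r) :
    (pvRowD N tr r).insert (r + 1) v = pvRowD N (tr ++ [(r, v)]) r := by
  apply PySem.Dict.ext
  rw [PySem.Dict.items_insert_of_contains _ v (pvRowD_contains N tr r (r+1) (by omega) hrN)]
  show ((PySem.List.pyRange 0 N).map _).map _ = _
  rw [List.map_map]
  apply List.map_congr_left
  intro t _
  by_cases ht : t = r + 1
  · subst ht
    simp [pvEnt_append_fresh tr r v [] hfresh]
  · simp only [Function.comp_apply]
    rw [if_neg (by simpa using ht)]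
    simp [ht]

lemma pvMD_modify (N : Int) (tr : List (Int × List String)) (r : Int) (v : List String)
    (hr0 : 0 ≤ r) (hrN : r + 1 < N) (hfresh : ∀ p ∈ tr, p.1 ≠ r) :
    (pvMD N tr).modify r PySem.Dict.empty (fun row => row.insert (r + 1) v) =
      pvMD N (tr ++ [(r, v)]) := by
  rw [PySem.Dict.modify, pvMD_getD N tr r hr0 (by omega)]
  apply PySem.Dict.ext
  rw [PySem.Dict.items_insert_of_contains _ _ (pvMD_contains N tr r hr0 (by omega))]
  show ((PySem.List.pyRange 0 N).map _).map _ = _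
  rw [List.map_map]
  apply List.map_congr_left
  intro s _
  by_cases hs : s = r
  · subst hs
    simp [pvRowD_insert N tr s v hr0 hrN hfresh]
  · simp only [Function.comp_apply]
    rw [if_neg (by simpa using hs)]
    have : pvRowD N tr s = pvRowD N (tr ++ [(r, v)]) s := by
      unfold pvRowD
      rw [pvEnt_append_right_ne tr [(r,v)] s (by intro p hp; simp at hp; subst hp; exact fun hh => hs hh.symm)]
    rw [this]

lemma pvAppendLast_concat (T0 : List (List Int)) (t : List Int) (x : Int) :
    pvAppendLast (T0 ++ [t]) x = T0 ++ [t ++ [x]] := by simp [pvAppendLast]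

lemma pvStepM (N o : Int) (tr : List (Int × List String)) (word : List String) (n : Nat)
    (htr : ∀ p ∈ tr, p.1 < o) (ho : 0 ≤ o)
    (hN : o + (word.length : Int) + 1 ≤ N) (hn : n < word.length) :
    (pvMD N (tr ++ (List.range n).map (fun (j : Nat) => (o + (j : Int), pvCharSet (word.getD j ""))))).modify
        (o + (n : Int)) PySem.Dict.empty
        (fun row => row.insert (o + (n : Int) + 1) (pvCharSet (PySem.List.pyGetD word ((n : Nat) : Int) ""))) =
      pvMD N (tr ++ (List.range (n + 1)).map (fun (j : Nat) => (o + (j : Int), pvCharSet (word.getD j "")))) := by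
  rw [pvMD_modify N _ (o + (n : Int)) _ (by omega) (by omega)
    (by intro p hp
        rcases List.mem_append.1 hp with h | h
        · have := htr p h; omega
        · obtain ⟨j, hj, rfl⟩ := List.mem_map.1 h
          have hj := List.mem_range.1 hj
          simp only []
          omega)]
  rw [List.append_assoc]
  congr 1
  rw [List.range_succ, List.map_append, List.map_singleton]
  congr 3
  rw [PySem.List.pyGetD_natCast]

lemma pvInner_inv (N o : Int) (tr : List (Int × List String)) (word : List String)
    (S F : PySem.Set Int) (T0 : List (List Int))
    (htr : ∀ p ∈ tr, p.1 < o) (ho : 0 ≤ o)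
    (hN : o + (word.length : Int) + 1 ≤ N) (hw : 1 ≤ word.length) :
    ∀ m : Nat, m ≤ word.length →
    (PySem.List.pyRange 0 (m : Int)).foldl (pvInnerBody word (word.length : Int))
        (pvMD N tr, o, S, F, T0 ++ [[]]) =
      (pvMD N (tr ++ (List.range m).map (fun (j : Nat) => (o + (j : Int), pvCharSet (word.getD j "")))),
       if m = word.length then o + (m : Int) + 1 else o + (m : Int),
       if m = 0 then S else PySem.Set.add S o,
       if m = word.length then PySem.Set.add F (o + (word.length : Int)) else F,
       T0 ++ [PySem.List.pyRange (o + 1) (o + (m : Int))]) := by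
  intro m hmle
  induction m with
  | zero =>
    rw [show ((0:Nat):Int) = 0 by norm_num, PySem.List.pyRange_one_eq_nil (le_refl 0)]
    simp only [List.foldl_nil, List.range_zero, List.map_nil, List.append_nil]
    rw [if_neg (by omega : ¬ (0:Nat) = word.length), if_neg (by omega : ¬ (0:Nat) = word.length)]
    rw [PySem.List.pyRange_one_eq_nil (by omega)]
    simp
  | succ n ih =>
    have hnlen : n < word.length := by omega
    have hcast : ((n+1 : Nat) : Int) = (n : Int) + 1 := by push_cast; ring
    rw [hcast, PySem.List.pyRange_one_succ_right (by positivity), List.foldl_append,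
      ih (by omega), List.foldl_cons, List.foldl_nil]
    unfold pvInnerBody
    split_ifs <;> try (exfalso; omega)
    all_goals simp only [Prod.mk.injEq]
    all_goals refine ⟨?_, ?_, ?_, ?_, ?_⟩
    all_goals first
      | trivial
      | exact pvStepM N o tr word n htr ho hN (by omega)
      | omega
      | rfl
      | (congr 1; omega)
      | (rw [pvAppendLast_concat]
         refine congrArg (fun z => T0 ++ [z]) ?_
         rw [show o + ((n:Int) + 1) = (o + (n : Int)) + 1 by ring,
           PySem.List.pyRange_one_succ_right (by omega)])
      | (refine congrArg (fun z => T0 ++ [z]) ?_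
         rw [PySem.List.pyRange_one_eq_nil (by omega), PySem.List.pyRange_one_eq_nil (by omega)])

lemma pvOuter_inv (L : List (List String)) (N : Int) (hN : pvOff L ≤ N) :
    ∀ m : Nat, m ≤ L.length →
    (PySem.List.pyRange 0 (m : Int)).foldl (pvOuterBody L)
        (pvMD N [], 0, PySem.Set.empty, PySem.Set.empty, []) =
      (pvMD N (pvTrans (L.take m)), pvOff (L.take m),
       pvStarts (L.take m), pvFinals (L.take m), pvTramas (L.take m)) := by
  intro m hmle
  induction m with
  | zero =>
    rw [show ((0:Nat):Int) = 0 by norm_num, PySem.List.pyRange_one_eq_nil (le_refl 0)]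
    simp [pvTrans, pvStarts, pvFinals, pvTramas, pvOff, PySem.Set.empty]
  | succ m ih =>
    have hm : m < L.length := by omega
    have hcast : ((m+1 : Nat) : Int) = (m : Int) + 1 := by push_cast; ring
    rw [hcast, PySem.List.pyRange_one_succ_right (by positivity), List.foldl_append,
      ih (by omega), List.foldl_cons, List.foldl_nil]
    unfold pvOuterBody
    have hword : PySem.List.pyGetD L ((m:Nat):Int) [] = L.getD m [] := by
      rw [PySem.List.pyGetD_natCast]
    rw [hword]
    set P := L.take m with hP
    set o := pvOff P with ho'
    set w := L.getD m [] with hw'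
    have htake : L.take (m+1) = P ++ [w] := by
      rw [List.take_add_one, List.getElem?_eq_getElem hm, Option.toList_some, hw', hP,
        List.getD_eq_getElem _ _ hm]
    have hsucc : pvOff (L.take (m+1)) = o + (w.length : Int) + 1 := pvOff_take_succ L m hm
    have hle : pvOff (L.take (m+1)) ≤ N := le_trans (pvOff_take_le L (m+1)) hN
    have hnonneg : 0 ≤ o := pvOff_nonneg P
    rw [htake] at hsucc hle
    have hSadd : PySem.Set.add (pvStarts P) o = pvStarts P ++ [o] :=
      PySem.Set.add_of_not_mem (fun h => absurd (pvMem_starts_lt P o h) (lt_irrefl o))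
    rw [htake, pvTrans_append, pvStarts_append, pvFinals_append, pvTramas_append]
    by_cases hwnil : (PySem.List.len w) = 0
    · have hw0 : w.length = 0 := by simpa [PySem.List.len_eq] using hwnil
      rw [if_pos hwnil]
      simp only [Prod.mk.injEq]
      refine ⟨?_, by omega, ?_, ?_, ?_⟩
      · rw [hw0]; simp
      · rw [hSadd]; try simp [ho']
      · rw [hw0]
        have : PySem.Set.add (pvFinals P) o = pvFinals P ++ [o] :=
          PySem.Set.add_of_not_mem (fun h => absurd (pvMem_finals_lt P o h) (lt_irrefl o))
        rw [this]; simp [ho']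
      · rw [hw0, PySem.List.pyRange_one_eq_nil (by simp [← ho'])]
        try simp [ho']
    · have hw1 : 1 ≤ w.length := by
        rw [PySem.List.len_eq] at hwnil; omega
      rw [if_neg hwnil, show PySem.List.len w = (w.length : Int) from PySem.List.len_eq w]
      rw [pvInner_inv N o (pvTrans P) w (pvStarts P) (pvFinals P) (pvTramas P)
        (fun p hp => (pvTrans_key_lt P p hp).2) hnonneg (by omega) hw1 w.length (le_refl _)]
      rw [if_pos rfl, if_pos rfl, if_neg (by omega)]
      simp only [Prod.mk.injEq]
      refine ⟨rfl, by omega, ?_, ?_, rfl⟩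
      · rw [hSadd]; try simp [ho']
      · rw [PySem.Set.add_of_not_mem (fun hmem => by
          have hlt := pvMem_finals_lt P _ hmem
          rw [← ho'] at hlt
          omega)]
        try simp [ho']

def pvSpecOut (L : List (List String)) :
    (List (Int × List (Int × List String))) × List Int × List Int × Int × List (List Int) :=
  ((PySem.List.pyRange 0 (pvOff L)).map (fun s =>
      (s, (PySem.List.pyRange 0 (pvOff L)).map (fun t =>
        (t, if t = s + 1 then pvEnt (pvTrans L) s else [])))),
   pvStarts L, pvFinals L, pvOff L, pvTramas L)

lemma pvInit_row (N : Int) :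
    ((PySem.List.pyRange 0 N).foldl (fun d i => d.insert i ([] : List String)) PySem.Dict.empty) =
      PySem.Dict.mk ((PySem.List.pyRange 0 N).map (fun i => (i, ([] : List String)))) := by
  apply PySem.Dict.ext
  rw [PySem.Dict.items_foldl_insert_fresh (l := PySem.List.pyRange 0 N) (k := fun a => a)
    (v := fun _ => ([] : List String)) (d := PySem.Dict.empty)
    (fun a _ => PySem.Dict.contains_empty a) (by simpa using PySem.List.nodup_pyRange_one 0 N)]
  simp [PySem.Dict.empty]

lemma pvInit_matrix (N : Int) :
    ((PySem.List.pyRange 0 N).foldl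
        (fun d i => d.insert i ((PySem.List.pyRange 0 N).foldl
          (fun d i => d.insert i ([] : List String)) PySem.Dict.empty))
        PySem.Dict.empty) = pvMD N [] := by
  apply PySem.Dict.ext
  rw [PySem.Dict.items_foldl_insert_fresh (l := PySem.List.pyRange 0 N) (k := fun a => a)
    (v := fun _ => (PySem.List.pyRange 0 N).foldl (fun d i => d.insert i ([] : List String)) PySem.Dict.empty)
    (d := PySem.Dict.empty)
    (fun a _ => PySem.Dict.contains_empty a) (by simpa using PySem.List.nodup_pyRange_one 0 N)]
  show List.map _ _ = List.map _ _
  apply List.map_congr_left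
  intro s _
  rw [pvInit_row N]
  refine congrArg (fun z => (s, z)) (PySem.Dict.ext ?_)
  show List.map _ _ = List.map _ _
  apply List.map_congr_left
  intro t _
  simp [pvEnt_nil]

lemma pvA_eq (L : List (List String)) (h : L ≠ []) : disjointAutomata L = pvSpecOut L := by
  have hlen : ¬ (PySem.List.len L = 0) := by
    rw [PySem.List.len_eq]
    have h2 : L.length ≠ 0 := fun hh => h (List.length_eq_zero_iff.1 hh)
    exact_mod_cast h2
  have hN : (PySem.List.len L) + (L.map (fun row => PySem.List.len row)).sum = pvOff L := by
    simp only [PySem.List.len_eq, pvOff]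
    rw [show (fun w : List String => ((w.length : Int) + 1)) = (fun w : List String => (w.length : Int) + (fun _ => (1:Int)) w) from rfl]
    rw [PySem.List.sum_map_add_int, PySem.List.sum_map_const_int]
    ring
  unfold disjointAutomata
  rw [if_neg hlen]
  simp only []
  rw [hN, pvInit_matrix (pvOff L)]
  have hcast : PySem.List.len L = ((L.length : Nat) : Int) := PySem.List.len_eq L
  rw [hcast, pvOuter_inv L (pvOff L) (le_refl _) L.length (le_refl _), List.take_length]
  unfold pvSpecOut
  simp [pvMD, pvRowD, List.map_map]

lemma pvOffsets_eq (L : List (List String)) :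
    L.foldl (fun acc w => acc ++ [PySem.List.pyGetD acc (-1) 0 + PySem.List.len w + 1]) [0] =
      (List.range (L.length + 1)).map (fun k => pvOff (L.take k)) := by
  induction L using List.reverseRecOn with
  | nil => simp [pvOff]
  | append_singleton P w ih =>
    rw [List.foldl_append, ih, List.foldl_cons, List.foldl_nil]
    rw [show (List.range (P.length + 1)).map (fun k => pvOff (P.take k)) =
        (List.range P.length).map (fun k => pvOff (P.take k)) ++ [pvOff P] by
      rw [List.range_succ, List.map_append, List.map_singleton, List.take_length]]
    rw [List.append_assoc, PySem.List.pyGetD_neg_one_append_singleton]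
    have hsp : (List.range ((P ++ [w]).length + 1)).map (fun k => pvOff ((P ++ [w]).take k)) =
        (List.range (P.length + 1)).map (fun k => pvOff ((P ++ [w]).take k)) ++ [pvOff (P ++ [w])] := by
      rw [show (P ++ [w]).length + 1 = (P.length + 1) + 1 by simp, List.range_succ,
        List.map_append, List.map_singleton, List.take_of_length_le (by simp)]
    have hmap : (List.range (P.length + 1)).map (fun k => pvOff ((P ++ [w]).take k)) =
        (List.range (P.length + 1)).map (fun k => pvOff (P.take k)) :=
      List.map_congr_left fun k hk => by
        rw [pvTake_app P w (by have := List.mem_range.1 hk; omega)]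
    rw [hsp, hmap, List.range_succ, List.map_append, List.map_singleton, List.take_length,
      show pvOff P + PySem.List.len w + 1 = pvOff (P ++ [w]) by
        rw [PySem.List.len_eq, pvOff_append]; simp [pvOff]; ring,
      ← List.append_assoc]

lemma pvStarts_pairwise (L : List (List String)) : (pvStarts L).Pairwise (· < ·) := by
  rw [List.pairwise_iff_getElem]
  intro i j hi hj hij
  simp only [pvStarts, List.length_map, List.length_range] at hi hj
  simp only [pvStarts, List.getElem_map, List.getElem_range]
  exact pvOff_take_lt L i j hij hj.le

lemma pvStarts_nodup (L : List (List String)) : (pvStarts L).Nodup :=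
  (pvStarts_pairwise L).imp (fun hlt => ne_of_lt hlt)

lemma pvFinals_pairwise (L : List (List String)) : (pvFinals L).Pairwise (· < ·) := by
  rw [List.pairwise_iff_getElem]
  intro i j hi hj hij
  simp only [pvFinals, List.length_map, List.length_range] at hi hj
  simp only [pvFinals, List.getElem_map, List.getElem_range]
  have h1 := pvOff_take_succ L i (by omega)
  have h2 : pvOff (L.take (i+1)) ≤ pvOff (L.take j) := pvOff_take_mono L (by omega)
  have h3 : (0 : Int) ≤ ((L.getD j []).length : Int) := by positivity
  omega

lemma pvFinals_nodup (L : List (List String)) : (pvFinals L).Nodup :=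
  (pvFinals_pairwise L).imp (fun hlt => ne_of_lt hlt)

lemma pvDictOfList_trans (L : List (List String)) :
    PySem.Dict.ofList (pvTrans L) = PySem.Dict.mk (pvTrans L) := by
  apply PySem.Dict.ext
  rw [PySem.Dict.ofList, PySem.Dict.update]
  rw [PySem.Dict.items_foldl_insert_fresh (l := pvTrans L) (k := fun p => p.1) (v := fun p => p.2)
    (d := PySem.Dict.empty) (fun a _ => PySem.Dict.contains_empty a.1)
    ((pvTrans_keys_pairwise L).imp (fun hlt => ne_of_lt hlt))]
  simp [PySem.Dict.empty]

lemma pvB_eq (L : List (List String)) (h : L ≠ []) : disjointAutomata_alt L = pvSpecOut L := by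
  have hne : ¬ (L.isEmpty = true) := by simp [h]
  simp only [disjointAutomata_alt]
  rw [if_neg hne]
  rw [pvOffsets_eq L]
  have hlast : PySem.List.pyGetD ((List.range (L.length+1)).map (fun k => pvOff (L.take k))) (-1) 0 = pvOff L := by
    rw [List.range_succ, List.map_append, List.map_singleton,
      PySem.List.pyGetD_neg_one_append_singleton, List.take_length]
  rw [hlast, PySem.List.len_eq L, PySem.List.pyRange_zero_nat L.length]
  have hoff : ∀ k : Nat, k < L.length →
      PySem.List.pyGetD ((List.range (L.length+1)).map (fun k => pvOff (L.take k))) (k : Int) 0 = pvOff (L.take k) := by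
    intro k hk
    rw [PySem.List.pyGetD_natCast, PySem.List.getD_map_range _ _ _ _ (by omega)]
  have htrans : ((List.range L.length).map (fun (k : Nat) => (k : Int))).flatMap (fun i =>
      (PySem.List.pyRange 0 (PySem.List.len (PySem.List.pyGetD L i []))).map (fun j =>
        (PySem.List.pyGetD ((List.range (L.length+1)).map (fun k => pvOff (L.take k))) i 0 + j,
          pvCharSet (PySem.List.pyGetD (PySem.List.pyGetD L i []) j "")))) = pvTrans L := by
    rw [List.flatMap_def, List.map_map]
    unfold pvTrans
    rw [List.flatMap_def]
    congr 1
    apply List.map_congr_left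
    intro k hk
    have hk := List.mem_range.1 hk
    simp only [Function.comp_apply]
    rw [PySem.List.pyGetD_natCast L (n := k), hoff k hk, PySem.List.len_eq,
      PySem.List.pyRange_zero_nat, List.map_map]
    apply List.map_congr_left
    intro j _
    simp only [Function.comp_apply]
    rw [PySem.List.pyGetD_natCast]
  rw [htrans, pvDictOfList_trans L]
  unfold pvSpecOut
  simp only [Prod.mk.injEq]
  refine ⟨?_, ?_, ?_, trivial, ?_⟩
  · apply List.map_congr_left
    intro s _
    refine congrArg (fun z => (s, z)) ?_
    apply List.map_congr_left
    intro t _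
    by_cases hc : (PySem.Dict.mk (pvTrans L)).contains s = true
    · by_cases ht : t = s + 1
      · rw [if_pos ⟨ht, hc⟩, if_pos ht]
        rfl
      · rw [if_neg (fun hh => ht hh.1), if_neg ht]
    · rw [if_neg (fun hh => hc hh.2)]
      rw [show pvEnt (pvTrans L) s = [] from
        PySem.Dict.getD_of_not_contains _ _ (Bool.eq_false_iff.mpr hc)]
      simp
  · rw [List.map_map]
    have : ((fun i => PySem.List.pyGetD ((List.range (L.length+1)).map (fun k => pvOff (L.take k))) i 0) ∘ (fun k : Nat => (k : Int))) = fun k : Nat => PySem.List.pyGetD ((List.range (L.length+1)).map (fun k => pvOff (L.take k))) (k : Int) 0 := rfl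
    rw [this]
    have hmap : (List.range L.length).map (fun k : Nat => PySem.List.pyGetD ((List.range (L.length+1)).map (fun k => pvOff (L.take k))) (k : Int) 0) = pvStarts L :=
      List.map_congr_left fun k hk => hoff k (List.mem_range.1 hk)
    rw [hmap]
    exact PySem.Set.ofList_eq_self_of_nodup _ (pvStarts_nodup L)
  · rw [List.map_map]
    have hmap : (List.range L.length).map ((fun i => PySem.List.pyGetD ((List.range (L.length+1)).map (fun k => pvOff (L.take k))) i 0 + PySem.List.len (PySem.List.pyGetD L i [])) ∘ (fun k : Nat => (k : Int))) = pvFinals L := by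
      apply List.map_congr_left
      intro k hk
      have hk := List.mem_range.1 hk
      simp only [Function.comp_apply]
      rw [hoff k hk, PySem.List.pyGetD_natCast, PySem.List.len_eq]
    rw [hmap]
    exact PySem.Set.ofList_eq_self_of_nodup _ (pvFinals_nodup L)
  · rw [List.map_map]
    apply List.map_congr_left
    intro k hk
    have hk := List.mem_range.1 hk
    simp only [Function.comp_apply]
    rw [hoff k hk, PySem.List.pyGetD_natCast, PySem.List.len_eq]

-- ===== VERDICT (by name: the statement is the Claim_ definition above) =====
theorem disjointAutomata_spec : Claim_equal_disjointAutomata := by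
  intro L _
  unfold Spec_disjointAutomata
  rcases eq_or_ne L [] with rfl | h
  · decide
  · rw [pvA_eq L h, pvB_eq L h]
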